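-- pv_equiv track=rewrite | github.com/seonho12-54/jungle | problem-solving/5주차/점프.py | bfs
-- ===== SOURCE A (Python) =====
-- from collections import deque
--
-- def bfs(n, small):
--     queue = deque()
--     visited = set()
--
--     # 처음은 무조건 1 -> 2 로 1칸 점프
--     if 2 in small:
--         return -1
--
--     queue.append((2, 1, 1))
--     # (현재 위치, 이전 점프 길이, 점프 횟수)
--
--     visited.add((2, 1))
--     # 방문한 위치와 점프 길이를 튜플로 저장하여 중복 방문 방지
--
--     while queue:
--         pos, jump, cnt = queue.popleft()
--
--         if pos == n: #목적지에 도착하면 점프 횟수 반환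
--             return cnt
--
--         for next_jump in (jump - 1, jump, jump + 1): #다음 점프 길이는 이전 점프 길이에서 -1, 0, +1 중 하나
--             if next_jump < 1:#점프 길이는 1 이상이어야 하므로 0 이하인 경우는 무시
--                 continue
--
--             next_pos = pos + next_jump#다음 위치는 현재 위치에서 다음 점프 길이만큼 이동한 위치
--
--             if next_pos > n:#목적지보다 멀리 이동하는 경우는 무시
--                 continue
--             if next_pos in small:#작은 돌이 있는 위치는 무시
--                 continue
--             if (next_pos, next_jump) in visited:#이미 방문한 위치와 점프 길이 조합은 무시
--                 continue
--
--             visited.add((next_pos, next_jump))#방문한 위치와 점프 길이 조합을 방문 처리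
--             queue.append((next_pos, next_jump, cnt + 1))#다음 위치, 다음 점프 길이, 점프 횟수 + 1을 큐에 추가
--
--     return -1
-- ===== SOURCE B (Python) =====
-- def bfs(n, small):
--     # Forward DP over positions instead of a BFS queue: the state graph is a DAG
--     # (every jump moves forward), so dist[(pos, j)] = min jumps to stand on pos with
--     # last jump j can be filled in increasing position order.  A jump of length j is
--     # only attainable once pos >= 1 + j*(j+1)//2 (jumps grow by at most 1 from 1), so
--     # the inner loop runs j while t = 1 + j*(j+1)//2 <= pos, and once pos > 2*last
--     # (last = highest position holding an entry) no later position is reachable.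
--     if 2 in small:
--         return -1
--     stones = set(small)
--     dist = {(2, 1): 1}
--     last = 2
--     pos = 3
--     while pos <= n and pos <= 2 * last:
--         if pos not in stones:
--             j, t = 1, 2
--             while t <= pos:
--                 cands = [dist[(pos - j, pj)] for pj in (j - 1, j, j + 1) if (pos - j, pj) in dist]
--                 if cands:
--                     dist[(pos, j)] = 1 + min(cands)
--                     last = pos
--                 j += 1
--                 t += j
--         pos += 1
--     finals = [d for (p, _), d in dist.items() if p == n]
--     return min(finals) if finals else -1
-- ===== Notes on version B (the rewrite author's own statement) =====
-- stated objective: alternative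
-- what changed: Replaced the BFS (deque of (pos,jump,count) tuples with a visited set) by a forward dynamic program over positions: every jump moves forward, so the state graph is a DAG and dist[(pos,j)] = 1 + min of the three predecessor entries is filled in increasing position order, the inner jump loop bounded by the triangular-number reachability limit and the outer loop stopped once pos exceeds twice the furthest table entry; the answer is the minimum over table entries at pos == n.
import Mathlib
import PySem

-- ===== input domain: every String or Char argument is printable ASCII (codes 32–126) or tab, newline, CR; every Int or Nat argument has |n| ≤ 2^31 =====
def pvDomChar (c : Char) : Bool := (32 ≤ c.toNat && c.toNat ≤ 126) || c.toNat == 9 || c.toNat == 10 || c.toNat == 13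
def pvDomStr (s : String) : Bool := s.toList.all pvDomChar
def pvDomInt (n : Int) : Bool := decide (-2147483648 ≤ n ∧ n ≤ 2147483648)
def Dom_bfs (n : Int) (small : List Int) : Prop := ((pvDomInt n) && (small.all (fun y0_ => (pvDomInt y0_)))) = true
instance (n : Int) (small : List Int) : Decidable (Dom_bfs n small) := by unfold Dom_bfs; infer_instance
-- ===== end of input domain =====

-- B replaces A's BFS (deque of (pos, jump, count) tuples + visited set) by a forward
-- dynamic program over positions (the state graph is a DAG since every jump moves
-- forward): an alternative algorithm of similar cost. Port A uses a fuel counter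
-- (n.toNat*n.toNat + 2), an upper bound on the number of BFS steps; the proofs show
-- fuel never runs out.

-- ===== PORT A =====
-- expansion of one popped state: fold over (jump-1, jump, jump+1), threading
-- (visited, queue); each admitted child is appended to visited and, with its count, to the queue
def pushA (n : Int) (small : List Int) (pos cnt : Int)
    (acc : List (Int × Int) × List (Int × Int × Int)) (nj : Int) :
    List (Int × Int) × List (Int × Int × Int) :=
  if nj < 1 then acc
  else
    let np := pos + nj
    if n < np then acc
    else if np ∈ small then acc
    else if (np, nj) ∈ acc.1 then acc
    else (acc.1 ++ [(np, nj)], acc.2 ++ [(np, nj, cnt + 1)])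

def loopA (n : Int) (small : List Int) : Nat → List (Int × Int × Int) → List (Int × Int) → Int
  | 0, _, _ => -1
  | _ + 1, [], _ => -1
  | f + 1, (pos, jump, cnt) :: rest, v =>
      if pos = n then cnt
      else
        let acc := [jump - 1, jump, jump + 1].foldl (pushA n small pos cnt) (v, rest)
        loopA n small f acc.2 acc.1

def bfs (n : Int) (small : List Int) : Int :=
  if (2 : Int) ∈ small then -1
  else loopA n small (n.toNat * n.toNat + 2) [(2, 1, 1)] [(2, 1)]

-- ===== PORT B =====
-- one inner-loop body on the state (dist, last): cands = the defined predecessor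
-- entries; if any, insert 1 + min(cands) and move last up to pos
def stepB (pos j : Int) (dl : PySem.Dict (Int × Int) Int × Int) :
    PySem.Dict (Int × Int) Int × Int :=
  match PySem.List.min?
      (([j - 1, j, j + 1] : List Int).filterMap (fun pj => dl.1.get? (pos - j, pj)))
      (fun x => x) with
  | some m => (dl.1.insert (pos, j) (1 + m), pos)
  | none => dl

-- the 'while t <= pos' loop over j (t tracks 1 + j*(j+1)//2 incrementally, as in Source B);
-- fuel pos.toNat bounds its iteration count (t grows by at least 2 each round)
def innerB (pos : Int) :
    Nat → Int → Int → PySem.Dict (Int × Int) Int × Int → PySem.Dict (Int × Int) Int × Int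
  | 0, _, _, dl => dl
  | f + 1, j, t, dl => if t ≤ pos then innerB pos f (j + 1) (t + (j + 1)) (stepB pos j dl) else dl

-- the 'while pos <= n and pos <= 2*last' loop of Source B (structural: pos climbs to n+1)
def outerW (n : Int) (small : List Int) (pos : Int)
    (dl : PySem.Dict (Int × Int) Int × Int) : PySem.Dict (Int × Int) Int × Int :=
  if h : pos ≤ n ∧ pos ≤ 2 * dl.2 then
    outerW n small (pos + 1)
      (if PySem.Set.contains (PySem.Set.ofList small) pos then dl
       else innerB pos pos.toNat 1 2 dl)
  else dl
termination_by (n + 1 - pos).toNat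
decreasing_by omega

-- the filled DP table
def dictB (n : Int) (small : List Int) : PySem.Dict (Int × Int) Int :=
  (outerW n small 3 (PySem.Dict.empty.insert (2, 1) 1, 2)).1

-- finals = [d for (p, _), d in dist.items() if p == n]
def finalsB (n : Int) (small : List Int) : List Int :=
  (dictB n small).items.filterMap (fun pv => if pv.1.1 = n then some pv.2 else none)

-- min(finals) if finals else -1
def dpRun (n : Int) (small : List Int) : Int :=
  match PySem.List.min? (finalsB n small) (fun x => x) with
  | some m => m
  | none => -1

def bfs_alt (n : Int) (small : List Int) : Int :=
  if (2 : Int) ∈ small then -1 else dpRun n small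

-- ===== PRECONDITION & SPEC =====
def Spec_bfs (n : Int) (small : List Int) (out : Int) : Prop := out = bfs_alt n small
instance (n : Int) (small : List Int) (out : Int) : Decidable (Spec_bfs n small out) := by unfold Spec_bfs; infer_instance

-- ===== CLAIM (what is proved, stated in full; the proofs are below) =====
def Claim_equal_bfs : Prop := ∀ (n : Int) (small : List Int), Dom_bfs n small → Spec_bfs n small (bfs n small)

-- ===== LEMMAS AND PROOFS =====

-- min of the defined ones among up to three optional values
def omin (a b : Option Int) : Option Int :=
  match a, b with
  | none, b => b
  | a, none => a
  | some x, some y => some (min x y)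

def omin3 (a b c : Option Int) : Option Int := omin a (omin b c)

-- the specification: dmin n small p j = minimal number of jumps to stand on p with last
-- jump j (the DAG shortest-path recurrence; positions only move forward, so recursion on p)
def dmin (n : Int) (small : List Int) (p j : Int) : Option Int :=
  if p = 2 ∧ j = 1 then some 1
  else if h : 3 ≤ p ∧ p ≤ n ∧ p ∉ small ∧ 1 ≤ j then
    match omin3 (dmin n small (p - j) (j - 1)) (dmin n small (p - j) j)
        (dmin n small (p - j) (j + 1)) with
    | some c => some (c + 1)
    | none => none
  else none
termination_by p.toNat
decreasing_by all_goals omega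

theorem omin3_cases (a b c : Option Int) (m : Int) (h : omin3 a b c = some m) :
    (a = some m ∨ b = some m ∨ c = some m) ∧
      (∀ x, a = some x → m ≤ x) ∧ (∀ x, b = some x → m ≤ x) ∧ (∀ x, c = some x → m ≤ x) := by
  cases a <;> cases b <;> cases c <;> simp_all [omin3, omin] <;> omega

theorem omin3_some_le (a b c : Option Int) (x : Int)
    (h : a = some x ∨ b = some x ∨ c = some x) :
    ∃ m, omin3 a b c = some m ∧ m ≤ x := by
  cases a <;> cases b <;> cases c <;> simp_all [omin3, omin] <;> omega

theorem dmin_facts (n : Int) (small : List Int) :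
    ∀ (N : Nat) (p j m : Int), p.toNat ≤ N → dmin n small p j = some m →
      1 ≤ m ∧ 2 ≤ p ∧ 1 ≤ j ∧ j * j + j + 2 ≤ 2 * p := by
  intro N
  induction N with
  | zero =>
    intro p j m hN h
    rw [dmin] at h
    split_ifs at h with h1 h2
    · omega
    · omega
  | succ N ih =>
    intro p j m hN h
    rw [dmin] at h
    split_ifs at h with h1 h2
    · obtain ⟨hp, hj⟩ := h1
      subst hp; subst hj
      simp at h
      refine ⟨by omega, by omega, by omega, by norm_num⟩
    · rcases ho : omin3 (dmin n small (p - j) (j - 1)) (dmin n small (p - j) j)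
        (dmin n small (p - j) (j + 1)) with _ | c
      · rw [ho] at h; simp at h
      · rw [ho] at h; simp at h
        obtain ⟨hmem, _⟩ := omin3_cases _ _ _ _ ho
        have hlt : (p - j).toNat ≤ N := by omega
        rcases hmem with hm | hm | hm
        · obtain ⟨a1, a2, a3, a4⟩ := ih (p - j) (j - 1) c hlt hm
          refine ⟨by omega, by omega, by omega, by nlinarith⟩
        · obtain ⟨a1, a2, a3, a4⟩ := ih (p - j) j c hlt hm
          refine ⟨by omega, by omega, by omega, by nlinarith⟩
        · obtain ⟨a1, a2, a3, a4⟩ := ih (p - j) (j + 1) c hlt hm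
          refine ⟨by omega, by omega, by omega, by nlinarith⟩

theorem dmin_def_facts (n : Int) (small : List Int) (p j m : Int)
    (h : dmin n small p j = some m) :
    1 ≤ m ∧ 2 ≤ p ∧ 1 ≤ j ∧ j * j + j + 2 ≤ 2 * p :=
  dmin_facts n small p.toNat p j m (le_refl _) h

theorem dmin_step (n : Int) (small : List Int) (p j : Int) (hp : ¬(p = 2 ∧ j = 1)) :
    dmin n small p j =
      if 3 ≤ p ∧ p ≤ n ∧ p ∉ small ∧ 1 ≤ j then
        match omin3 (dmin n small (p - j) (j - 1)) (dmin n small (p - j) j)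
            (dmin n small (p - j) (j + 1)) with
        | some c => some (c + 1)
        | none => none
      else none := by
  rw [dmin]
  simp [hp]

theorem dmin_base (n : Int) (small : List Int) : dmin n small 2 1 = some 1 := by
  rw [dmin]; simp

theorem dmin_eq_one_iff (n : Int) (small : List Int) (p j : Int) :
    dmin n small p j = some 1 ↔ p = 2 ∧ j = 1 := by
  constructor
  · intro h
    by_contra hp
    rw [dmin_step n small p j hp] at h
    split_ifs at h with h1
    rcases ho : omin3 (dmin n small (p - j) (j - 1)) (dmin n small (p - j) j)
        (dmin n small (p - j) (j + 1)) with _ | c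
    · rw [ho] at h; simp at h
    · rw [ho] at h; simp at h
      obtain ⟨hmem, _⟩ := omin3_cases _ _ _ _ ho
      rcases hmem with hm | hm | hm <;>
        · have := (dmin_def_facts n small _ _ _ hm).1; omega
  · rintro ⟨hp, hj⟩; subst hp; subst hj; exact dmin_base n small

theorem no_level (n : Int) (small : List Int) (c : Int) (hc : 1 ≤ c)
    (h : ∀ s : Int × Int, dmin n small s.1 s.2 ≠ some c) :
    ∀ m, c ≤ m → ∀ p j, dmin n small p j ≠ some m := by
  intro m hm
  induction m, hm using Int.le_induction with
  | base => exact fun p j => h (p, j)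
  | succ m hcm ih =>
    intro p j hd
    have hne : ¬(p = 2 ∧ j = 1) := by
      intro hb
      rw [(dmin_eq_one_iff n small p j).mpr hb] at hd
      simp at hd; omega
    rw [dmin_step n small p j hne] at hd
    split_ifs at hd with h1
    rcases ho : omin3 (dmin n small (p - j) (j - 1)) (dmin n small (p - j) j)
        (dmin n small (p - j) (j + 1)) with _ | c'
    · rw [ho] at hd; simp at hd
    · rw [ho] at hd; simp at hd
      have hc' : c' = m := by omega
      subst hc'
      obtain ⟨hmem, _⟩ := omin3_cases _ _ _ _ ho
      rcases hmem with hm' | hm' | hm'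
      · exact ih (p - j) (j - 1) hm'
      · exact ih (p - j) j hm'
      · exact ih (p - j) (j + 1) hm'

theorem dmin_none_low (n : Int) (small : List Int) (p j : Int) (hp : p < 3)
    (hne : ¬(p = 2 ∧ j = 1)) : dmin n small p j = none := by
  rw [dmin_step n small p j hne, if_neg (by omega)]

theorem dmin_none_high (n : Int) (small : List Int) (p j : Int) (hp : n < p) (hp3 : 3 ≤ p) :
    dmin n small p j = none := by
  rw [dmin_step n small p j (by omega), if_neg (by omega)]

theorem dmin_none_stone (n : Int) (small : List Int) (p j : Int) (hp3 : 3 ≤ p)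
    (hs : p ∈ small) : dmin n small p j = none := by
  rw [dmin_step n small p j (by omega), if_neg (fun hh => hh.2.2.1 hs)]

theorem filterMap3 (g : Int → Option Int) (x y z : Int) :
    [x, y, z].filterMap g = [g x, g y, g z].filterMap id := by
  rcases hx : g x with _ | vx <;> rcases hy : g y with _ | vy <;> rcases hz : g z with _ | vz <;>
    simp [List.filterMap_cons, hx, hy, hz]

theorem min?_filterMap3 (a b c : Option Int) :
    PySem.List.min? ([a, b, c].filterMap id) (fun x => x) = omin3 a b c := by
  rcases a with _ | x <;> rcases b with _ | y <;> rcases c with _ | z <;>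
    simp [PySem.List.min?_id_cons, PySem.List.min?_eq_none_iff, List.foldl_cons, List.foldl_nil,
      omin3, omin] <;> omega

theorem stepB_get? (pos j : Int) (dl : PySem.Dict (Int × Int) Int × Int) (p' j' : Int) :
    (stepB pos j dl).1.get? (p', j') =
      if p' = pos ∧ j' = j then
        match omin3 (dl.1.get? (pos - j, j - 1)) (dl.1.get? (pos - j, j))
            (dl.1.get? (pos - j, j + 1)) with
        | some m => some (1 + m)
        | none => dl.1.get? (pos, j)
      else dl.1.get? (p', j') := by
  unfold stepB
  rw [filterMap3, min?_filterMap3]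
  rcases ho : omin3 (dl.1.get? (pos - j, j - 1)) (dl.1.get? (pos - j, j))
      (dl.1.get? (pos - j, j + 1)) with _ | m
  · simp only
    split_ifs with h
    · obtain ⟨h1, h2⟩ := h; subst h1; subst h2; rfl
    · rfl
  · simp only [PySem.Dict.get?_insert]
    split_ifs with h1 h2 h2
    · rfl
    · exact absurd ⟨congrArg Prod.fst h1, congrArg Prod.snd h1⟩ h2
    · exact absurd (by rw [h2.1, h2.2] : (p', j') = (pos, j)) h1
    · rfl

theorem stepB_snd (pos j : Int) (dl : PySem.Dict (Int × Int) Int × Int) :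
    (stepB pos j dl).2 =
      match omin3 (dl.1.get? (pos - j, j - 1)) (dl.1.get? (pos - j, j))
          (dl.1.get? (pos - j, j + 1)) with
      | some _ => pos
      | none => dl.2 := by
  unfold stepB
  rw [filterMap3, min?_filterMap3]
  rcases ho : omin3 (dl.1.get? (pos - j, j - 1)) (dl.1.get? (pos - j, j))
      (dl.1.get? (pos - j, j + 1)) with _ | m <;> rfl

-- entries with j < 1 or beyond the triangular bound are impossible
theorem row_none (n : Int) (small : List Int) (P J t : Int) (hP3 : 3 ≤ P)
    (hJ : 1 ≤ J) (ht : 2 * t = J * J + J + 2) (hPt : P < t)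
    (hnone : ∀ j : Int, 1 ≤ j → j < J → dmin n small P j = none) :
    ∀ j m : Int, dmin n small P j ≠ some m := by
  intro j m hd
  obtain ⟨_, _, hj1, htri⟩ := dmin_def_facts n small P j m hd
  by_cases hjJ : j < J
  · rw [hnone j hj1 hjJ] at hd; simp at hd
  · have : J ≤ j := by omega
    nlinarith

-- once the while-loop has exited (t > P), the partial table row is in fact complete
theorem row_done (n : Int) (small : List Int) (P J t : Int)
    (hJ : 1 ≤ J) (ht : 2 * t = J * J + J + 2) (hPt : P < t)
    (d : PySem.Dict (Int × Int) Int)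
    (Hd : ∀ p j : Int, d.get? (p, j) =
      if p < P then dmin n small p j
      else if p = P ∧ 1 ≤ j ∧ j < J then dmin n small P j else none) :
    ∀ p j : Int, d.get? (p, j) =
      if p < P then dmin n small p j
      else if p = P then dmin n small P j else none := by
  intro p j
  rw [Hd p j]
  by_cases hp : p < P
  · simp [hp]
  · simp only [if_neg hp]
    by_cases hpP : p = P
    · by_cases hj : 1 ≤ j ∧ j < J
      · rw [if_pos ⟨hpP, hj.1, hj.2⟩, if_pos hpP]
      · rw [if_neg (fun hh => hj ⟨hh.2.1, hh.2.2⟩), if_pos hpP]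
        rcases hd : dmin n small P j with _ | m
        · rfl
        · exfalso
          obtain ⟨_, _, hj1, htri⟩ := dmin_def_facts n small P j m hd
          have hjJ : J ≤ j := by
            rcases not_and_or.mp hj with h | h <;> omega
          nlinarith
    · rw [if_neg (fun hh => hpP hh.1), if_neg hpP]

theorem innerB_get? (n : Int) (small : List Int) (P last0 : Int)
    (hP3 : 3 ≤ P) (hPn : P ≤ n) (hPs : P ∉ small) :
    ∀ (f : Nat) (J t : Int) (d : PySem.Dict (Int × Int) Int) (last : Int),
      1 ≤ J → 2 * t = J * J + J + 2 → P < t + 2 * (f : Int) →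
      (∀ p j : Int, d.get? (p, j) =
        if p < P then dmin n small p j
        else if p = P ∧ 1 ≤ j ∧ j < J then dmin n small P j else none) →
      ((last = last0 ∧ ∀ j : Int, 1 ≤ j → j < J → dmin n small P j = none) ∨ last = P) →
      (∀ p j : Int, (innerB P f J t (d, last)).1.get? (p, j) =
        if p < P then dmin n small p j
        else if p = P then dmin n small P j else none) ∧
      (((innerB P f J t (d, last)).2 = last0 ∧ ∀ j m : Int, dmin n small P j ≠ some m) ∨
        (innerB P f J t (d, last)).2 = P) := by
  intro f
  induction f with
  | zero =>
    intro J t d last hJ ht hf Hd hl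
    refine ⟨row_done n small P J t hJ ht (by push_cast at hf; omega) d Hd, ?_⟩
    rcases hl with ⟨hl1, hl2⟩ | hl
    · exact Or.inl ⟨hl1, row_none n small P J t hP3 hJ ht (by push_cast at hf; omega) hl2⟩
    · exact Or.inr hl
  | succ f ih =>
    intro J t d last hJ ht hf Hd hl
    have hun : innerB P (f + 1) J t (d, last) =
        if t ≤ P then innerB P f (J + 1) (t + (J + 1)) (stepB P J (d, last)) else (d, last) :=
      rfl
    rw [hun]
    by_cases htP : t ≤ P
    · rw [if_pos htP]
      have hg1 : d.get? (P - J, J - 1) = dmin n small (P - J) (J - 1) := by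
        rw [Hd]; rw [if_pos (by omega)]
      have hg2 : d.get? (P - J, J) = dmin n small (P - J) J := by
        rw [Hd]; rw [if_pos (by omega)]
      have hg3 : d.get? (P - J, J + 1) = dmin n small (P - J) (J + 1) := by
        rw [Hd]; rw [if_pos (by omega)]
      have hdm : dmin n small P J =
          match omin3 (dmin n small (P - J) (J - 1)) (dmin n small (P - J) J)
              (dmin n small (P - J) (J + 1)) with
          | some c => some (c + 1)
          | none => none := by
        rw [dmin_step n small P J (by omega)]
        rw [if_pos ⟨hP3, hPn, hPs, hJ⟩]
      have hpair : stepB P J (d, last) = ((stepB P J (d, last)).1, (stepB P J (d, last)).2) :=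
        rfl
      rw [hpair]
      refine ih (J + 1) (t + (J + 1)) _ _ (by omega) (by linear_combination ht)
        (by push_cast at hf ⊢; omega) ?_ ?_
      · intro p j
        rw [stepB_get?]
        by_cases h1 : p = P ∧ j = J
        · rw [if_pos h1]
          obtain ⟨hp, hj⟩ := h1
          subst hp; subst hj
          show (match omin3 (d.get? (p - j, j - 1)) (d.get? (p - j, j))
              (d.get? (p - j, j + 1)) with
            | some m => some (1 + m)
            | none => d.get? (p, j)) = _
          rw [hg1, hg2, hg3]
          rcases ho : omin3 (dmin n small (p - j) (j - 1)) (dmin n small (p - j) j)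
              (dmin n small (p - j) (j + 1)) with _ | m
          · rw [if_neg (lt_irrefl p), if_pos ⟨rfl, hJ, by omega⟩]
            show d.get? (p, j) = dmin n small p j
            have hnone : dmin n small p j = none := by rw [hdm, ho]
            rw [Hd, hnone, if_neg (lt_irrefl p),
              if_neg (fun hh => absurd hh.2.2 (lt_irrefl j))]
          · rw [if_neg (lt_irrefl p), if_pos ⟨rfl, hJ, by omega⟩]
            show some (1 + m) = dmin n small p j
            rw [hdm, ho]
            congr 1
            omega
        · rw [if_neg h1]
          show d.get? (p, j) = _
          rw [Hd]
          by_cases q1 : p < P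
          · simp [q1]
          · simp only [if_neg q1]
            by_cases q2 : p = P ∧ 1 ≤ j ∧ j < J
            · rw [if_pos q2, if_pos ⟨q2.1, q2.2.1, by omega⟩]
            · have hq : ¬(p = P ∧ 1 ≤ j ∧ j < J + 1) := by
                rintro ⟨a, b, c⟩
                by_cases hc : j < J
                · exact q2 ⟨a, b, hc⟩
                · exact h1 ⟨a, by omega⟩
              rw [if_neg q2, if_neg hq]
      · rw [stepB_snd]
        show (match omin3 (d.get? (P - J, J - 1)) (d.get? (P - J, J))
            (d.get? (P - J, J + 1)) with
          | some _ => P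
          | none => last) = last0 ∧ _ ∨ _ = P
        rw [hg1, hg2, hg3]
        rcases ho : omin3 (dmin n small (P - J) (J - 1)) (dmin n small (P - J) J)
            (dmin n small (P - J) (J + 1)) with _ | m
        · rcases hl with ⟨hl1, hl2⟩ | hl
          · refine Or.inl ⟨hl1, ?_⟩
            intro j hj1 hjJ1
            by_cases hjJ : j < J
            · exact hl2 j hj1 hjJ
            · have : j = J := by omega
              subst this
              rw [hdm, ho]
          · exact Or.inr hl
        · exact Or.inr rfl
    · rw [if_neg htP]
      refine ⟨row_done n small P J t hJ ht (by omega) d Hd, ?_⟩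
      rcases hl with ⟨hl1, hl2⟩ | hl
      · exact Or.inl ⟨hl1, row_none n small P J t hP3 hJ ht (by omega) hl2⟩
      · exact Or.inr hl

theorem d0_get? (p j : Int) :
    ((PySem.Dict.empty : PySem.Dict (Int × Int) Int).insert (2, 1) 1).get? (p, j) =
      if p = 2 ∧ j = 1 then some 1 else none := by
  rw [PySem.Dict.get?_insert]
  by_cases h : p = 2 ∧ j = 1
  · rw [if_pos (by rw [h.1, h.2]), if_pos h]
  · rw [if_neg (fun hh => h ⟨congrArg Prod.fst hh, congrArg Prod.snd hh⟩), if_neg h,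
      PySem.Dict.get?_empty]

-- once the gap to the furthest table entry exceeds 2*last, nothing further is reachable
theorem dmin_gap (n : Int) (small : List Int) (P last : Int)
    (hlast2 : 2 ≤ last) (hgap : 2 * last < P)
    (Hlast : ∀ p j m : Int, p < P → dmin n small p j = some m → p ≤ last) :
    ∀ (N : Nat) (p j : Int), p.toNat ≤ N → P ≤ p → dmin n small p j = none := by
  intro N
  induction N with
  | zero =>
    intro p j hN hP
    omega
  | succ N ih =>
    intro p j hN hP
    rcases hd : dmin n small p j with _ | m
    · rfl
    exfalso
    obtain ⟨_, hp2, hj1, htri⟩ := dmin_def_facts n small p j m hd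
    have hne : ¬(p = 2 ∧ j = 1) := by omega
    rw [dmin_step n small p j hne] at hd
    split_ifs at hd with hgd
    rcases ho : omin3 (dmin n small (p - j) (j - 1)) (dmin n small (p - j) j)
        (dmin n small (p - j) (j + 1)) with _ | c
    · rw [ho] at hd; simp at hd
    obtain ⟨hmem, _⟩ := omin3_cases _ _ _ _ ho
    have hpred : ∃ pj : Int, dmin n small (p - j) pj = some c ∧
        (pj = j - 1 ∨ pj = j ∨ pj = j + 1) := by
      rcases hmem with h | h | h
      · exact ⟨j - 1, h, Or.inl rfl⟩
      · exact ⟨j, h, Or.inr (Or.inl rfl)⟩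
      · exact ⟨j + 1, h, Or.inr (Or.inr rfl)⟩
    obtain ⟨pj, hpd, _⟩ := hpred
    by_cases hc : P ≤ p - j
    · have := ih (p - j) pj (by omega) hc
      rw [this] at hpd
      simp at hpd
    · have hle : p - j ≤ last := Hlast (p - j) pj c (by omega) hpd
      have hjlast : last < j := by omega
      nlinarith

theorem outerW_get? (n : Int) (small : List Int) :
    ∀ (k : Nat) (pos : Int) (d : PySem.Dict (Int × Int) Int) (last : Int),
      (n + 1 - pos).toNat ≤ k → 3 ≤ pos → 2 ≤ last → last < pos →
      (∀ p j : Int, d.get? (p, j) = if p < pos then dmin n small p j else none) →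
      (∀ p j m : Int, p < pos → dmin n small p j = some m → p ≤ last) →
      ∀ p j : Int, (outerW n small pos (d, last)).1.get? (p, j) = dmin n small p j := by
  intro k
  induction k with
  | zero =>
    intro pos d last hk h3 hlast2 hlastpos Hd Hlast p j
    rw [outerW]
    have hng : ¬(pos ≤ n ∧ pos ≤ 2 * (d, last).2) := fun hh => by
      have : pos ≤ n := hh.1
      omega
    rw [dif_neg hng]
    rw [Hd p j]
    by_cases hp : p < pos
    · rw [if_pos hp]
    · rw [if_neg hp, dmin_none_high n small p j (by omega) (by omega)]
  | succ k ih =>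
    intro pos d last hk h3 hlast2 hlastpos Hd Hlast p j
    rw [outerW]
    by_cases hcond : pos ≤ n ∧ pos ≤ 2 * (d, last).2
    · rw [dif_pos hcond]
      by_cases hs : pos ∈ small
      · have hc : PySem.Set.contains (PySem.Set.ofList small) pos = true := by
          rw [PySem.Set.contains_iff, PySem.Set.mem_ofList]; exact hs
        rw [hc, if_pos rfl]
        refine ih (pos + 1) d last (by omega) (by omega) hlast2 (by omega) ?_ ?_ p j
        · intro p' j'
          rw [Hd p' j']
          by_cases hp' : p' < pos
          · rw [if_pos hp', if_pos (by omega)]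
          · rw [if_neg hp']
            by_cases hp2 : p' < pos + 1
            · rw [if_pos hp2, (by omega : p' = pos),
                dmin_none_stone n small pos j' (by omega) hs]
            · rw [if_neg hp2]
        · intro p' j' m hp' hd
          by_cases hpp : p' < pos
          · exact Hlast p' j' m hpp hd
          · exfalso
            rw [(by omega : p' = pos), dmin_none_stone n small pos j' (by omega) hs] at hd
            simp at hd
      · have hc : PySem.Set.contains (PySem.Set.ofList small) pos = false := by
          rw [← Bool.not_eq_true, PySem.Set.contains_iff, PySem.Set.mem_ofList]; exact hs
        rw [hc]
        simp only [Bool.false_eq_true, if_false]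
        obtain ⟨hD, hL⟩ := innerB_get? n small pos last (by omega) (by exact hcond.1) hs
          pos.toNat 1 2 d last (le_refl 1) (by norm_num) (by omega)
          (by
            intro p' j'
            rw [Hd p' j']
            by_cases hp' : p' < pos
            · rw [if_pos hp', if_pos hp']
            · simp only [if_neg hp']
              rw [if_neg (show ¬(p' = pos ∧ 1 ≤ j' ∧ j' < 1) from
                fun hh => absurd hh.2.2 (not_lt.mpr hh.2.1))])
          (Or.inl ⟨rfl, fun j' hj1 hj2 => absurd hj2 (not_lt.mpr hj1)⟩)
        have hpair : innerB pos pos.toNat 1 2 (d, last) =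
            ((innerB pos pos.toNat 1 2 (d, last)).1, (innerB pos pos.toNat 1 2 (d, last)).2) :=
          rfl
        rw [hpair]
        refine ih (pos + 1) _ _ (by omega) (by omega) ?_ ?_ ?_ ?_ p j
        · rcases hL with ⟨he, _⟩ | he <;> rw [he] <;> omega
        · rcases hL with ⟨he, _⟩ | he <;> rw [he] <;> omega
        · intro p' j'
          rw [hD p' j']
          by_cases hp' : p' < pos
          · rw [if_pos hp', if_pos (by omega)]
          · rw [if_neg hp']
            by_cases hp2 : p' < pos + 1
            · rw [if_pos (by omega : p' = pos), if_pos hp2, (by omega : p' = pos)]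
            · rw [if_neg (by omega), if_neg hp2]
        · intro p' j' m hp' hd
          rcases hL with ⟨he, hnone⟩ | he
          · rw [he]
            by_cases hpp : p' < pos
            · exact Hlast p' j' m hpp hd
            · exact absurd hd (by rw [(by omega : p' = pos)]; exact hnone j' m)
          · rw [he]
            by_cases hpp : p' < pos
            · have := Hlast p' j' m hpp hd
              omega
            · omega
    · rw [dif_neg hcond]
      rcases not_and_or.mp hcond with hn | hl
      · rw [Hd p j]
        by_cases hp : p < pos
        · rw [if_pos hp]
        · rw [if_neg hp, dmin_none_high n small p j (by omega) (by omega)]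
      · rw [Hd p j]
        by_cases hp : p < pos
        · rw [if_pos hp]
        · rw [if_neg hp,
            dmin_gap n small pos last hlast2 (by simp at hl; omega) Hlast p.toNat p j
              (le_refl _) (by omega)]

theorem dictB_get? (n : Int) (small : List Int) (p j : Int) :
    (dictB n small).get? (p, j) = dmin n small p j := by
  unfold dictB
  refine outerW_get? n small (n + 1 - 3).toNat 3 _ 2 (le_refl _) (le_refl _) (le_refl _)
    (by omega) ?_ ?_ p j
  · intro p' j'
    rw [d0_get?]
    by_cases h : p' = 2 ∧ j' = 1
    · rw [if_pos h, if_pos (by omega), h.1, h.2, dmin_base]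
    · rw [if_neg h]
      by_cases hp : p' < 3
      · rw [if_pos hp, dmin_none_low n small p' j' hp h]
      · rw [if_neg hp]
  · intro p' j' m hp' hd
    have := (dmin_def_facts n small p' j' m hd).2.1
    omega

theorem stepB_nodup (pos j : Int) (dl : PySem.Dict (Int × Int) Int × Int)
    (h : dl.1.keys.Nodup) : (stepB pos j dl).1.keys.Nodup := by
  unfold stepB
  rcases PySem.List.min?
      (([j - 1, j, j + 1] : List Int).filterMap (fun pj => dl.1.get? (pos - j, pj)))
      (fun x => x)
    with _ | m
  · exact h
  · exact PySem.Dict.nodup_keys_insert _ _ _ h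

theorem innerB_nodup (pos : Int) :
    ∀ (f : Nat) (j t : Int) (dl : PySem.Dict (Int × Int) Int × Int), dl.1.keys.Nodup →
      (innerB pos f j t dl).1.keys.Nodup
  | 0, _, _, _, h => h
  | f + 1, j, t, dl, h => by
    show (if t ≤ pos then innerB pos f (j + 1) (t + (j + 1)) (stepB pos j dl) else dl).1.keys.Nodup
    split_ifs with hyp
    · exact innerB_nodup pos f (j + 1) (t + (j + 1)) _ (stepB_nodup pos j dl h)
    · exact h

theorem outerW_nodup (n : Int) (small : List Int) :
    ∀ (k : Nat) (pos : Int) (dl : PySem.Dict (Int × Int) Int × Int),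
      (n + 1 - pos).toNat ≤ k → dl.1.keys.Nodup → (outerW n small pos dl).1.keys.Nodup := by
  intro k
  induction k with
  | zero =>
    intro pos dl hk h
    rw [outerW, dif_neg (show ¬(pos ≤ n ∧ pos ≤ 2 * dl.2) from fun hh => by omega)]
    exact h
  | succ k ih =>
    intro pos dl hk h
    rw [outerW]
    by_cases hc : pos ≤ n ∧ pos ≤ 2 * dl.2
    · rw [dif_pos hc]
      by_cases hs : PySem.Set.contains (PySem.Set.ofList small) pos = true
      · rw [if_pos hs]
        exact ih (pos + 1) dl (by omega) h
      · rw [if_neg hs]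
        exact ih (pos + 1) _ (by omega) (innerB_nodup pos pos.toNat 1 2 dl h)
    · rw [dif_neg hc]
      exact h

theorem dictB_nodup (n : Int) (small : List Int) : (dictB n small).keys.Nodup := by
  unfold dictB
  exact outerW_nodup n small (n + 1 - 3).toNat 3 _ (le_refl _)
    (PySem.Dict.nodup_keys_insert _ _ _ PySem.Dict.nodup_keys_empty)

theorem min?_of_mem_of_le (l : List Int) (c : Int) (hm : c ∈ l) (hle : ∀ x ∈ l, c ≤ x) :
    PySem.List.min? l (fun x => x) = some c := by
  rcases hmin : PySem.List.min? l (fun x => x) with _ | m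
  · rw [PySem.List.min?_eq_none_iff] at hmin
    subst hmin; simp at hm
  · have h2 : m ≤ c := PySem.List.min?_isMin hmin c hm
    have h3 : c ≤ m := hle m (PySem.List.min?_mem hmin)
    have : m = c := by omega
    rw [this]

theorem mem_finalsB (n : Int) (small : List Int) (x : Int) :
    x ∈ finalsB n small ↔ ∃ j, dmin n small n j = some x := by
  unfold finalsB
  rw [List.mem_filterMap]
  constructor
  · rintro ⟨⟨⟨pp, jj⟩, vv⟩, hmem, heq⟩
    split_ifs at heq with hp
    simp only [Option.some.injEq] at heq
    simp only at hp
    subst hp; subst heq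
    have hq : (dictB pp small).get? (pp, jj) = some vv :=
      PySem.Dict.get?_of_mem_items (d := dictB pp small) hmem (dictB_nodup pp small)
    rw [dictB_get?] at hq
    exact ⟨jj, hq⟩
  · rintro ⟨j, hj⟩
    refine ⟨((n, j), x), ?_, by simp⟩
    exact PySem.Dict.mem_items_of_get?_eq_some (d := dictB n small)
      (by rw [dictB_get?]; exact hj)

def pushB (n : Int) (small : List Int) (pos : Int)
    (acc : List (Int × Int) × List (Int × Int)) (nj : Int) :
    List (Int × Int) × List (Int × Int) :=
  if nj < 1 then acc
  else
    let np := pos + nj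
    if n < np then acc
    else if np ∈ small then acc
    else if (np, nj) ∈ acc.1 then acc
    else (acc.1 ++ [(np, nj)], acc.2 ++ [(np, nj)])

def levelB (n : Int) (small : List Int) (front : List (Int × Int))
    (acc : List (Int × Int) × List (Int × Int)) : List (Int × Int) × List (Int × Int) :=
  front.foldl (fun acc s => [s.2 - 1, s.2, s.2 + 1].foldl (pushB n small s.1) acc) acc

def loopB (n : Int) (small : List Int) : Nat → Int → List (Int × Int) → List (Int × Int) → Int
  | 0, _, _, _ => -1
  | f + 1, steps, front, v =>
      if front.isEmpty then -1
      else if front.any (fun s => s.1 = n) then steps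
      else
        let acc := levelB n small front (v, [])
        loopB n small f (steps + 1) acc.2 acc.1

def Good (n : Int) (small : List Int) (p nj : Int) (s : Int × Int) : Prop :=
  1 ≤ nj ∧ p + nj ≤ n ∧ p + nj ∉ small ∧ s = (p + nj, nj)

def EdgeTo (n : Int) (small : List Int) (front : List (Int × Int)) (s : Int × Int) : Prop :=
  ∃ q ∈ front, ∃ nj, (nj = q.2 - 1 ∨ nj = q.2 ∨ nj = q.2 + 1) ∧ Good n small q.1 nj s


-- ----- level-order BFS machinery (proof-side), relating A's counted queue to frontiers -----

-- tagging a count onto a (pos, jump) state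
def tag3 (c : Int) (s : Int × Int) : Int × Int × Int := (s.1, s.2, c)

-- the finite state space (pos, jump) with 1 ≤ jump ≤ pos ≤ n
noncomputable def SFin (n : Int) : Finset (Int × Int) :=
  (Finset.Icc (1 : Int) n ×ˢ Finset.Icc (1 : Int) n).filter (fun s => s.2 ≤ s.1)

-- BFS measure of an accumulator (visited, pending)
noncomputable def meas (n : Int) (v : List (Int × Int)) (q : List (Int × Int)) : Nat :=
  q.length + ((SFin n).filter (fun s => s ∉ v)).card

theorem loopA_nil (n : Int) (small : List Int) (f : Nat) (v : List (Int × Int)) :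
    loopA n small f [] v = -1 := by
  cases f <;> simp [loopA]

-- pushA on a queue of shape r ++ tagged ys corresponds to pushB on ys
theorem foldAB (n : Int) (small : List Int) (pos c : Int) :
    ∀ (l : List Int) (v : List (Int × Int)) (r : List (Int × Int × Int)) (ys : List (Int × Int)),
      l.foldl (pushA n small pos c) (v, r ++ ys.map (tag3 (c + 1))) =
        ((l.foldl (pushB n small pos) (v, ys)).1,
          r ++ (l.foldl (pushB n small pos) (v, ys)).2.map (tag3 (c + 1)))
  | [], v, r, ys => rfl
  | nj :: l, v, r, ys => by
      simp only [List.foldl_cons]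
      by_cases h1 : nj < 1
      · simpa [pushA, pushB, h1] using foldAB n small pos c l v r ys
      · by_cases h2 : n < pos + nj
        · simpa [pushA, pushB, h1, h2] using foldAB n small pos c l v r ys
        · by_cases h3 : pos + nj ∈ small
          · simpa [pushA, pushB, h1, h2, h3] using foldAB n small pos c l v r ys
          · by_cases h4 : (pos + nj, nj) ∈ v
            · simpa [pushA, pushB, h1, h2, h3, h4] using foldAB n small pos c l v r ys
            · have := foldAB n small pos c l (v ++ [(pos + nj, nj)]) r (ys ++ [(pos + nj, nj)])
              simpa [pushA, pushB, h1, h2, h3, h4, tag3] using this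

-- processing an A-level with no hit equals expanding the whole level B-style
theorem levelA_eq (n : Int) (small : List Int) (c : Int) :
    ∀ (xs ys : List (Int × Int)) (v : List (Int × Int)) (f : Nat),
      (∀ s ∈ xs, s.1 ≠ n) →
      loopA n small (f + xs.length) (xs.map (tag3 c) ++ ys.map (tag3 (c + 1))) v =
        loopA n small f ((levelB n small xs (v, ys)).2.map (tag3 (c + 1)))
          (levelB n small xs (v, ys)).1
  | [], ys, v, f, _ => by simp [levelB]
  | (p, j) :: xs, ys, v, f, h => by
      have hp : p ≠ n := h (p, j) (by simp)
      have hrec :=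
        foldAB n small p c [j - 1, j, j + 1] v (xs.map (tag3 c)) ys
      simp only [List.map_cons, List.cons_append, List.length_cons, tag3]
      have : f + (xs.length + 1) = (f + xs.length) + 1 := by omega
      rw [this]
      show (if p = n then c else _) = _
      rw [if_neg hp]
      simp only [hrec]
      have hx : ∀ s ∈ xs, s.1 ≠ n := fun s hs => h s (by simp [hs])
      have := levelA_eq n small c xs
        (([j - 1, j, j + 1].foldl (pushB n small p) (v, ys)).2)
        (([j - 1, j, j + 1].foldl (pushB n small p) (v, ys)).1) f hx
      simpa [levelB, List.foldl_cons] using this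

-- an A-level containing a hit returns c
theorem levelA_hit (n : Int) (small : List Int) (c : Int) :
    ∀ (xs ys : List (Int × Int)) (v : List (Int × Int)) (f : Nat),
      (∃ s ∈ xs, s.1 = n) →
      loopA n small (f + xs.length) (xs.map (tag3 c) ++ ys.map (tag3 (c + 1))) v = c
  | [], _, _, _, h => by simp at h
  | (p, j) :: xs, ys, v, f, h => by
      simp only [List.map_cons, List.cons_append, List.length_cons, tag3]
      have : f + (xs.length + 1) = (f + xs.length) + 1 := by omega
      rw [this]
      by_cases hp : p = n
      · show (if p = n then c else _) = c
        rw [if_pos hp]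
      · show (if p = n then c else _) = c
        rw [if_neg hp]
        have hx : ∃ s ∈ xs, s.1 = n := by
          rcases h with ⟨s, hs, hsn⟩
          rcases List.mem_cons.mp hs with h' | h'
          · exact absurd (by rw [h'] at hsn; exact hsn) hp
          · exact ⟨s, h', hsn⟩
        have hrec := foldAB n small p c [j - 1, j, j + 1] v (xs.map (tag3 c)) ys
        simp only [hrec]
        exact levelA_hit n small c xs _ _ f hx

-- one pushB step preserves the measure and the nonnegativity of pending entries
theorem pushB_inv (n : Int) (small : List Int) (pos : Int) (hpos : 0 ≤ pos)
    (acc : List (Int × Int) × List (Int × Int)) (nj : Int)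
    (hq : ∀ s ∈ acc.2, 0 ≤ s.1) :
    meas n (pushB n small pos acc nj).1 (pushB n small pos acc nj).2 = meas n acc.1 acc.2 ∧
      (∀ s ∈ (pushB n small pos acc nj).2, 0 ≤ s.1) := by
  by_cases h1 : nj < 1
  · have heq : pushB n small pos acc nj = acc := by simp [pushB, h1]
    rw [heq]; exact ⟨rfl, hq⟩
  by_cases h2 : n < pos + nj
  · have heq : pushB n small pos acc nj = acc := by simp [pushB, h1, h2]
    rw [heq]; exact ⟨rfl, hq⟩
  by_cases h3 : pos + nj ∈ small
  · have heq : pushB n small pos acc nj = acc := by simp [pushB, h1, h2, h3]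
    rw [heq]; exact ⟨rfl, hq⟩
  by_cases h4 : (pos + nj, nj) ∈ acc.1
  · have heq : pushB n small pos acc nj = acc := by simp [pushB, h1, h2, h3, h4]
    rw [heq]; exact ⟨rfl, hq⟩
  have hmem : (pos + nj, nj) ∈ (SFin n).filter (fun s => s ∉ acc.1) := by
    simp only [SFin, Finset.mem_filter, Finset.mem_product, Finset.mem_Icc]
    refine ⟨⟨⟨⟨by omega, by omega⟩, ⟨by omega, by omega⟩⟩, by omega⟩, h4⟩
  have hfe : (SFin n).filter (fun s => s ∉ acc.1 ++ [(pos + nj, nj)]) =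
      ((SFin n).filter (fun s => s ∉ acc.1)).erase (pos + nj, nj) := by
    ext x
    simp only [Finset.mem_filter, Finset.mem_erase, List.mem_append, List.mem_singleton]
    tauto
  have hcard : 1 ≤ ((SFin n).filter (fun s => s ∉ acc.1)).card :=
    Finset.card_pos.mpr ⟨_, hmem⟩
  constructor
  · simp only [pushB, h1, h2, h3, h4, if_false]
    simp only [meas, hfe, Finset.card_erase_of_mem hmem, List.length_append,
      List.length_singleton]
    omega
  · simp only [pushB, h1, h2, h3, h4, if_false]
    intro s hs
    rcases List.mem_append.mp hs with h' | h'
    · exact hq s h'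
    · simp at h'; subst h'; simp; omega

theorem fold3_inv (n : Int) (small : List Int) (pos : Int) (hpos : 0 ≤ pos) :
    ∀ (l : List Int) (acc : List (Int × Int) × List (Int × Int)),
      (∀ s ∈ acc.2, 0 ≤ s.1) →
      meas n (l.foldl (pushB n small pos) acc).1 (l.foldl (pushB n small pos) acc).2 =
          meas n acc.1 acc.2 ∧
        (∀ s ∈ (l.foldl (pushB n small pos) acc).2, 0 ≤ s.1)
  | [], acc, hq => ⟨rfl, hq⟩
  | nj :: l, acc, hq => by
      obtain ⟨hm, hq'⟩ := pushB_inv n small pos hpos acc nj hq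
      obtain ⟨hm', hq''⟩ := fold3_inv n small pos hpos l (pushB n small pos acc nj) hq'
      exact ⟨by simpa [hm] using hm', by simpa using hq''⟩

theorem levelB_inv (n : Int) (small : List Int) :
    ∀ (front : List (Int × Int)) (acc : List (Int × Int) × List (Int × Int)),
      (∀ s ∈ front, 0 ≤ s.1) → (∀ s ∈ acc.2, 0 ≤ s.1) →
      meas n (levelB n small front acc).1 (levelB n small front acc).2 =
          meas n acc.1 acc.2 ∧
        (∀ s ∈ (levelB n small front acc).2, 0 ≤ s.1)
  | [], acc, _, hq => ⟨rfl, hq⟩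
  | (p, j) :: front, acc, hf, hq => by
      have hp : 0 ≤ p := hf (p, j) (by simp)
      obtain ⟨hm, hq'⟩ := fold3_inv n small p hp [j - 1, j, j + 1] acc hq
      have hf' : ∀ s ∈ front, 0 ≤ s.1 := fun s hs => hf s (by simp [hs])
      obtain ⟨hm', hq''⟩ :=
        levelB_inv n small front ([j - 1, j, j + 1].foldl (pushB n small p) acc) hf' hq'
      have hstep : levelB n small ((p, j) :: front) acc =
          levelB n small front ([j - 1, j, j + 1].foldl (pushB n small p) acc) := rfl
      rw [hstep]
      exact ⟨hm'.trans hm, hq''⟩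

-- main correspondence: A's counted queue at a level boundary equals B's frontier loop
theorem main_eq (n : Int) (small : List Int) :
    ∀ (f2 f1 : Nat) (front v : List (Int × Int)) (c : Int),
      (∀ s ∈ front, 0 ≤ s.1) →
      meas n v front ≤ f1 → meas n v front ≤ f2 →
      loopA n small f1 (front.map (tag3 c)) v = loopB n small f2 c front v := by
  intro f2
  induction f2 with
  | zero =>
      intro f1 front v c _ _ h2
      have : front = [] := by
        have := h2
        simp only [meas] at this
        cases front with
        | nil => rfl
        | cons a l => simp at this
      subst this
      simp [loopB, loopA_nil]
  | succ f2 ih =>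
      intro f1 front v c hf h1 h2
      cases front with
      | nil => simp [loopB, loopA_nil]
      | cons s front' =>
        have hlen : 1 ≤ (s :: front').length := by simp
        have hμ : (s :: front').length ≤ meas n v (s :: front') := by simp [meas]
        by_cases hhit : ∃ t ∈ s :: front', t.1 = n
        · have hb : (s :: front').any (fun t => t.1 = n) = true := by
            rcases hhit with ⟨t, ht, htn⟩
            exact List.any_eq_true.mpr ⟨t, ht, by simp [htn]⟩
          have hA : loopA n small f1 ((s :: front').map (tag3 c)) v = c := by
            have hf1 : f1 = (f1 - (s :: front').length) + (s :: front').length := by omega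
            rw [hf1]
            have := levelA_hit n small c (s :: front') [] v (f1 - (s :: front').length) hhit
            simpa using this
          rw [hA]
          simp [loopB, hb]
        · have hb : (s :: front').any (fun t => t.1 = n) = false := by
            simp only [List.any_eq_false]
            intro t ht
            simp only [decide_eq_true_eq]
            exact fun htn => hhit ⟨t, ht, htn⟩
          have hnohit : ∀ t ∈ s :: front', t.1 ≠ n := fun t ht htn => hhit ⟨t, ht, htn⟩
          have hf1 : f1 = (f1 - (s :: front').length) + (s :: front').length := by omega
          have hA : loopA n small f1 ((s :: front').map (tag3 c)) v =
              loopA n small (f1 - (s :: front').length)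
                ((levelB n small (s :: front') (v, [])).2.map (tag3 (c + 1)))
                (levelB n small (s :: front') (v, [])).1 := by
            rw [hf1]
            have := levelA_eq n small c (s :: front') [] v (f1 - (s :: front').length) hnohit
            simpa using this
          obtain ⟨hm, hq⟩ := levelB_inv n small (s :: front') (v, []) hf (by simp)
          have hmeas0 : meas n v ([] : List (Int × Int)) = meas n v (s :: front') - (s :: front').length := by
            simp [meas]
          have hm' : meas n (levelB n small (s :: front') (v, [])).1
              (levelB n small (s :: front') (v, [])).2 =
              meas n v (s :: front') - (s :: front').length := by
            rw [hm]; exact hmeas0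
          rw [hA]
          have hB : loopB n small (f2 + 1) c (s :: front') v =
              loopB n small f2 (c + 1) (levelB n small (s :: front') (v, [])).2
                (levelB n small (s :: front') (v, [])).1 := by
            simp [loopB, hb]
          rw [hB]
          exact ih (f1 - (s :: front').length) _ _ (c + 1) hq
            (by omega) (by omega)

theorem card_SFin_le (n : Int) : (SFin n).card ≤ n.toNat * n.toNat := by
  calc (SFin n).card ≤ (Finset.Icc (1 : Int) n ×ˢ Finset.Icc (1 : Int) n).card :=
        Finset.card_filter_le _ _
    _ = (Finset.Icc (1 : Int) n).card * (Finset.Icc (1 : Int) n).card := Finset.card_product _ _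
    _ ≤ n.toNat * n.toNat := by
        have : (Finset.Icc (1 : Int) n).card = (n + 1 - 1).toNat := Int.card_Icc 1 n
        have h2 : (Finset.Icc (1 : Int) n).card = n.toNat := by rw [this]; congr 1; omega
        rw [h2]

theorem push_mem (n : Int) (small : List Int) (p : Int) (v : List (Int × Int))
    (acc : List (Int × Int) × List (Int × Int)) (nj : Int)
    (hacc : ∀ s, s ∈ acc.1 ↔ s ∈ v ∨ s ∈ acc.2) :
    (∀ s, s ∈ (pushB n small p acc nj).2 ↔
        s ∈ acc.2 ∨ (Good n small p nj s ∧ s ∉ v)) ∧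
      (∀ s, s ∈ (pushB n small p acc nj).1 ↔ s ∈ v ∨ s ∈ (pushB n small p acc nj).2) := by
  unfold pushB
  by_cases h1 : nj < 1
  · rw [if_pos h1]
    refine ⟨fun s => ?_, hacc⟩
    have hng : ¬(Good n small p nj s ∧ s ∉ v) := fun hh => absurd hh.1.1 (by omega)
    tauto
  · rw [if_neg h1]
    show (∀ s, s ∈ (if n < p + nj then acc else _).2 ↔ _) ∧ _
    by_cases h2 : n < p + nj
    · rw [if_pos h2]
      refine ⟨fun s => ?_, hacc⟩
      have hng : ¬(Good n small p nj s ∧ s ∉ v) := fun hh => absurd hh.1.2.1 (by omega)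
      tauto
    · rw [if_neg h2]
      by_cases h3 : p + nj ∈ small
      · rw [if_pos h3]
        refine ⟨fun s => ?_, hacc⟩
        have hng : ¬(Good n small p nj s ∧ s ∉ v) := fun hh => absurd h3 hh.1.2.2.1
        tauto
      · rw [if_neg h3]
        by_cases h4 : (p + nj, nj) ∈ acc.1
        · rw [if_pos h4]
          refine ⟨fun s => ?_, hacc⟩
          have hng : Good n small p nj s ∧ s ∉ v → s ∈ acc.2 := by
            rintro ⟨⟨g1, g2, g3, g4⟩, hv⟩
            subst g4
            rcases (hacc _).mp h4 with h | h
            · exact absurd h hv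
            · exact h
          tauto
        · rw [if_neg h4]
          constructor
          · intro s
            simp only [List.mem_append, List.mem_singleton]
            constructor
            · rintro (hs | hs)
              · exact Or.inl hs
              · refine Or.inr ⟨⟨by omega, by omega, h3, hs⟩, fun hv => ?_⟩
                exact h4 (hs ▸ (hacc s).mpr (Or.inl hv))
            · rintro (hs | ⟨⟨g1, g2, g3', g4⟩, hv⟩)
              · exact Or.inl hs
              · exact Or.inr g4
          · intro s
            have := hacc s
            simp only [List.mem_append, List.mem_singleton] at *
            tauto

theorem fold_pushB_mem (n : Int) (small : List Int) (p : Int) (v : List (Int × Int)) :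
    ∀ (l : List Int) (acc : List (Int × Int) × List (Int × Int)),
      (∀ s, s ∈ acc.1 ↔ s ∈ v ∨ s ∈ acc.2) →
      (∀ s, s ∈ (l.foldl (pushB n small p) acc).2 ↔
          s ∈ acc.2 ∨ ((∃ nj ∈ l, Good n small p nj s) ∧ s ∉ v)) ∧
        (∀ s, s ∈ (l.foldl (pushB n small p) acc).1 ↔
          s ∈ v ∨ s ∈ (l.foldl (pushB n small p) acc).2)
  | [], acc, hacc => ⟨fun s => by simp, hacc⟩
  | nj :: l, acc, hacc => by
    rw [List.foldl_cons]
    obtain ⟨k2, k1⟩ := push_mem n small p v acc nj hacc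
    obtain ⟨i2, i1⟩ := fold_pushB_mem n small p v l (pushB n small p acc nj) k1
    refine ⟨fun s => ?_, i1⟩
    rw [i2 s, k2 s]
    simp only [List.mem_cons]
    constructor
    · rintro ((hs | ⟨hg, hv⟩) | ⟨⟨x, hx, hgx⟩, hv⟩)
      · exact Or.inl hs
      · exact Or.inr ⟨⟨nj, Or.inl rfl, hg⟩, hv⟩
      · exact Or.inr ⟨⟨x, Or.inr hx, hgx⟩, hv⟩
    · rintro (hs | ⟨⟨x, hx | hx, hgx⟩, hv⟩)
      · exact Or.inl (Or.inl hs)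
      · exact Or.inl (Or.inr ⟨hx ▸ hgx, hv⟩)
      · exact Or.inr ⟨⟨x, hx, hgx⟩, hv⟩

theorem levelB_mem (n : Int) (small : List Int) (v : List (Int × Int)) :
    ∀ (front : List (Int × Int)) (acc : List (Int × Int) × List (Int × Int)),
      (∀ s, s ∈ acc.1 ↔ s ∈ v ∨ s ∈ acc.2) →
      (∀ s, s ∈ (levelB n small front acc).2 ↔
          s ∈ acc.2 ∨ (EdgeTo n small front s ∧ s ∉ v)) ∧
        (∀ s, s ∈ (levelB n small front acc).1 ↔
          s ∈ v ∨ s ∈ (levelB n small front acc).2)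
  | [], acc, hacc => ⟨fun s => by simp [EdgeTo, levelB], hacc⟩
  | q :: front, acc, hacc => by
    have hstep : levelB n small (q :: front) acc =
        levelB n small front ([q.2 - 1, q.2, q.2 + 1].foldl (pushB n small q.1) acc) := rfl
    rw [hstep]
    obtain ⟨k2, k1⟩ := fold_pushB_mem n small q.1 v [q.2 - 1, q.2, q.2 + 1] acc hacc
    obtain ⟨i2, i1⟩ := levelB_mem n small v front _ k1
    refine ⟨fun s => ?_, i1⟩
    rw [i2 s, k2 s]
    simp only [EdgeTo, List.mem_cons]
    constructor
    · rintro ((hs | ⟨⟨x, hx, hgx⟩, hv⟩) | ⟨⟨r, hr, hnj⟩, hv⟩)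
      · exact Or.inl hs
      · refine Or.inr ⟨⟨q, Or.inl rfl, x, ?_, hgx⟩, hv⟩
        simpa using hx
      · exact Or.inr ⟨⟨r, Or.inr hr, hnj⟩, hv⟩
    · rintro (hs | ⟨⟨r, hr | hr, x, hx, hgx⟩, hv⟩)
      · exact Or.inl (Or.inl hs)
      · refine Or.inl (Or.inr ⟨⟨x, ?_, hr ▸ hgx⟩, hv⟩)
        simpa using (hr ▸ hx)
      · exact Or.inr ⟨⟨r, hr, x, hx, hgx⟩, hv⟩

-- ----- the BFS frontier at level c is exactly {s | dmin s = some c} -----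

theorem frontier_step (n : Int) (small : List Int) (c : Int) (hc : 1 ≤ c)
    (front v : List (Int × Int))
    (Hf : ∀ s : Int × Int, s ∈ front ↔ dmin n small s.1 s.2 = some c)
    (Hv : ∀ s : Int × Int, s ∈ v ↔ ∃ m, m ≤ c ∧ dmin n small s.1 s.2 = some m) :
    (∀ s : Int × Int, s ∈ (levelB n small front (v, [])).2 ↔
        dmin n small s.1 s.2 = some (c + 1)) ∧
      (∀ s : Int × Int, s ∈ (levelB n small front (v, [])).1 ↔
        s ∈ v ∨ s ∈ (levelB n small front (v, [])).2) := by
  obtain ⟨k2, k1⟩ := levelB_mem n small v front (v, []) (by intro s; simp)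
  refine ⟨fun s => ?_, k1⟩
  rw [k2 s]
  simp only [List.not_mem_nil, false_or]
  constructor
  · rintro ⟨⟨q, hq, nj, hnj, g1, g2, g3, g4⟩, hv⟩
    have hdq := (Hf q).mp hq
    obtain ⟨hm1, hq2, hqj, _⟩ := dmin_def_facts n small q.1 q.2 c hdq
    subst g4
    show dmin n small (q.1 + nj) nj = some (c + 1)
    have hne : ¬(q.1 + nj = 2 ∧ nj = 1) := fun hh => by omega
    have hcomp : dmin n small (q.1 + nj - nj) (nj - 1) = some c ∨
        dmin n small (q.1 + nj - nj) nj = some c ∨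
        dmin n small (q.1 + nj - nj) (nj + 1) = some c := by
      rw [(by ring : q.1 + nj - nj = q.1)]
      rcases hnj with h | h | h
      · right; right; rw [(by omega : nj + 1 = q.2)]; exact hdq
      · right; left; rw [h]; exact hdq
      · left; rw [(by omega : nj - 1 = q.2)]; exact hdq
    obtain ⟨m, hm, hmc⟩ := omin3_some_le _ _ _ c hcomp
    have hds : dmin n small (q.1 + nj) nj = some (m + 1) := by
      rw [dmin_step n small _ _ hne, if_pos ⟨by omega, g2, g3, g1⟩, hm]
    have hnv : ¬(m + 1 ≤ c) := fun hle => hv ((Hv _).mpr ⟨m + 1, hle, hds⟩)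
    rw [hds]
    congr 2
    omega
  · intro hds
    have hne : ¬(s.1 = 2 ∧ s.2 = 1) := by
      intro hb
      have h1 := (dmin_eq_one_iff n small s.1 s.2).mpr hb
      rw [h1] at hds
      simp at hds
      omega
    have hds' := hds
    rw [dmin_step n small s.1 s.2 hne] at hds'
    split_ifs at hds' with hg
    rcases ho : omin3 (dmin n small (s.1 - s.2) (s.2 - 1)) (dmin n small (s.1 - s.2) s.2)
        (dmin n small (s.1 - s.2) (s.2 + 1)) with _ | m
    · rw [ho] at hds'; simp at hds'
    · rw [ho] at hds'; simp only [Option.some.injEq] at hds'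
      have hm : m = c := by omega
      subst hm
      obtain ⟨hmem, _⟩ := omin3_cases _ _ _ _ ho
      have hself : ∀ x : Int, s = (s.1 - s.2 + s.2, s.2) := by
        intro _; rw [(by ring : s.1 - s.2 + s.2 = s.1)]
      refine ⟨?_, ?_⟩
      · rcases hmem with h | h | h
        · exact ⟨(s.1 - s.2, s.2 - 1), (Hf _).mpr h, s.2, Or.inr (Or.inr (by ring)),
            hg.2.2.2, by rw [(by ring : s.1 - s.2 + s.2 = s.1)]; exact hg.2.1,
            by rw [(by ring : s.1 - s.2 + s.2 = s.1)]; exact hg.2.2.1, hself 0⟩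
        · exact ⟨(s.1 - s.2, s.2), (Hf _).mpr h, s.2, Or.inr (Or.inl rfl),
            hg.2.2.2, by rw [(by ring : s.1 - s.2 + s.2 = s.1)]; exact hg.2.1,
            by rw [(by ring : s.1 - s.2 + s.2 = s.1)]; exact hg.2.2.1, hself 0⟩
        · exact ⟨(s.1 - s.2, s.2 + 1), (Hf _).mpr h, s.2, Or.inl (by ring),
            hg.2.2.2, by rw [(by ring : s.1 - s.2 + s.2 = s.1)]; exact hg.2.1,
            by rw [(by ring : s.1 - s.2 + s.2 = s.1)]; exact hg.2.2.1, hself 0⟩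
      · intro hv
        obtain ⟨m', hm', hdm'⟩ := (Hv s).mp hv
        rw [hds] at hdm'
        simp at hdm'
        omega

-- dpRun when some state at position n is reachable with minimal count c
theorem dpRun_hit (n : Int) (small : List Int) (c : Int)
    (hhit : ∃ j, dmin n small n j = some c)
    (hle : ∀ j m : Int, dmin n small n j = some m → c ≤ m) : dpRun n small = c := by
  unfold dpRun
  have hm : PySem.List.min? (finalsB n small) (fun x => x) = some c := by
    refine min?_of_mem_of_le _ c ((mem_finalsB n small c).mpr hhit) ?_
    intro x hx
    obtain ⟨j, hj⟩ := (mem_finalsB n small x).mp hx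
    exact hle j x hj
  rw [hm]

-- dpRun when no state at position n is reachable
theorem dpRun_none (n : Int) (small : List Int)
    (hnone : ∀ j m : Int, dmin n small n j ≠ some m) : dpRun n small = -1 := by
  unfold dpRun
  have hnil : finalsB n small = [] := by
    rw [List.eq_nil_iff_forall_not_mem]
    intro x hx
    obtain ⟨j, hj⟩ := (mem_finalsB n small x).mp hx
    exact hnone j x hj
  rw [hnil]
  have h0 : PySem.List.min? ([] : List Int) (fun x => x) = none := by
    rw [PySem.List.min?_eq_none_iff]
  rw [h0]

-- the level loop computes exactly dpRun
theorem loopB_spec (n : Int) (small : List Int) :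
    ∀ (f : Nat) (c : Int) (front v : List (Int × Int)),
      1 ≤ c →
      (∀ s : Int × Int, s ∈ front ↔ dmin n small s.1 s.2 = some c) →
      (∀ s : Int × Int, s ∈ v ↔ ∃ m, m ≤ c ∧ dmin n small s.1 s.2 = some m) →
      (∀ j m : Int, dmin n small n j = some m → c ≤ m) →
      meas n v front ≤ f →
      loopB n small f c front v = dpRun n small := by
  intro f
  induction f with
  | zero =>
    intro c front v hc Hf Hv Hhit hμ
    have hnil : front = [] := by
      cases front with
      | nil => rfl
      | cons a l => simp [meas] at hμ
    subst hnil
    show (-1 : Int) = dpRun n small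
    refine (dpRun_none n small ?_).symm
    intro j m hd
    exact no_level n small c hc (fun s hs => by simpa using (Hf s).mpr hs)
      m (Hhit j m hd) n j hd
  | succ f ih =>
    intro c front v hc Hf Hv Hhit hμ
    cases front with
    | nil =>
      show (-1 : Int) = dpRun n small
      refine (dpRun_none n small ?_).symm
      intro j m hd
      exact no_level n small c hc (fun s hs => by simpa using (Hf s).mpr hs)
        m (Hhit j m hd) n j hd
    | cons s0 front' =>
      have hne : ((s0 :: front').isEmpty) = false := rfl
      by_cases hhit : (s0 :: front').any (fun s => s.1 = n)
      · have hB : loopB n small (f + 1) c (s0 :: front') v = c := by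
          show (if (s0 :: front').isEmpty then _ else _) = c
          rw [hne]
          simp only [Bool.false_eq_true, if_false, hhit, if_true]
        rw [hB]
        obtain ⟨t, ht, htn⟩ := List.any_eq_true.mp hhit
        simp only [decide_eq_true_eq] at htn
        have hdt := (Hf t).mp ht
        rw [htn] at hdt
        exact (dpRun_hit n small c ⟨t.2, hdt⟩ Hhit).symm
      · have hb : (s0 :: front').any (fun s => s.1 = n) = false := by
          exact Bool.not_eq_true _ ▸ (by simpa using hhit)
        have hpos : ∀ s ∈ s0 :: front', 0 ≤ s.1 := by
          intro s hs
          have := (Hf s).mp hs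
          have := (dmin_def_facts n small s.1 s.2 c this).2.1
          omega
        obtain ⟨hf2, hf1⟩ := frontier_step n small c hc (s0 :: front') v Hf Hv
        obtain ⟨hm, _⟩ := levelB_inv n small (s0 :: front') (v, []) hpos (by simp)
        have hB : loopB n small (f + 1) c (s0 :: front') v =
            loopB n small f (c + 1) (levelB n small (s0 :: front') (v, [])).2
              (levelB n small (s0 :: front') (v, [])).1 := by
          show (if (s0 :: front').isEmpty then _ else _) = _
          rw [hne]
          simp only [Bool.false_eq_true, if_false, hb]
        rw [hB]
        refine ih (c + 1) _ _ (by omega) hf2 ?_ ?_ ?_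
        · intro s
          rw [hf1 s]
          constructor
          · rintro (hs | hs)
            · obtain ⟨m, hm', hd⟩ := (Hv s).mp hs
              exact ⟨m, by omega, hd⟩
            · exact ⟨c + 1, le_refl _, (hf2 s).mp hs⟩
          · rintro ⟨m, hm', hd⟩
            by_cases hmc : m ≤ c
            · exact Or.inl ((Hv s).mpr ⟨m, hmc, hd⟩)
            · have : m = c + 1 := by omega
              subst this
              exact Or.inr ((hf2 s).mpr hd)
        · intro j m hd
          have h1 := Hhit j m hd
          rcases eq_or_lt_of_le h1 with h2 | h2
          · exfalso
            have : ((n : Int), j) ∈ s0 :: front' := (Hf (n, j)).mpr (by rw [← h2] at hd; exact hd)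
            have : (s0 :: front').any (fun s => s.1 = n) = true :=
              List.any_eq_true.mpr ⟨(n, j), this, by simp⟩
            rw [this] at hb; exact Bool.true_eq_false.mp hb
          · omega
        · have h0 : meas n v ([] : List (Int × Int)) =
              meas n v (s0 :: front') - (s0 :: front').length := by simp [meas]
          have hlen : 1 ≤ (s0 :: front').length := by simp
          have hμ2 : (s0 :: front').length ≤ meas n v (s0 :: front') := by simp [meas]
          rw [hm, h0]
          omega

-- ===== VERDICT (by name: the statement is the Claim_ definition above) =====
theorem bfs_spec : Claim_equal_bfs := by
  intro n small _
  unfold Spec_bfs bfs bfs_alt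
  by_cases h : (2 : Int) ∈ small
  · rw [if_pos h, if_pos h]
  · rw [if_neg h, if_neg h]
    have hmap : ([((2 : Int), (1 : Int), (1 : Int))] : List (Int × Int × Int)) =
        ([((2 : Int), (1 : Int))] : List (Int × Int)).map (tag3 1) := by simp [tag3]
    have hμ : meas n [((2 : Int), (1 : Int))] [((2 : Int), (1 : Int))] ≤
        n.toNat * n.toNat + 2 := by
      have := card_SFin_le n
      have hle : ((SFin n).filter (fun s => s ∉ [((2 : Int), (1 : Int))])).card ≤ (SFin n).card :=
        Finset.card_filter_le _ _
      simp only [meas, List.length_singleton]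
      omega
    have Hf0 : ∀ s : Int × Int, s ∈ [((2 : Int), (1 : Int))] ↔
        dmin n small s.1 s.2 = some 1 := by
      intro s
      constructor
      · intro hs
        simp only [List.mem_singleton] at hs
        subst hs
        exact dmin_base n small
      · intro hd
        obtain ⟨h1, h2⟩ := (dmin_eq_one_iff n small s.1 s.2).mp hd
        simp only [List.mem_singleton]
        rw [← h1, ← h2]
    have Hv0 : ∀ s : Int × Int, s ∈ [((2 : Int), (1 : Int))] ↔
        ∃ m, m ≤ 1 ∧ dmin n small s.1 s.2 = some m := by
      intro s
      rw [Hf0 s]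
      constructor
      · exact fun hd => ⟨1, le_refl _, hd⟩
      · rintro ⟨m, hm, hd⟩
        have := (dmin_def_facts n small s.1 s.2 m hd).1
        have : m = 1 := by omega
        rw [← this]; exact hd
    have Hhit0 : ∀ j m : Int, dmin n small n j = some m → 1 ≤ m :=
      fun j m hd => (dmin_def_facts n small n j m hd).1
    rw [hmap, main_eq n small (n.toNat * n.toNat + 2) (n.toNat * n.toNat + 2)
      [((2 : Int), (1 : Int))] [((2 : Int), (1 : Int))] 1 (by simp) hμ hμ]
    exact loopB_spec n small (n.toNat * n.toNat + 2) 1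
      [((2 : Int), (1 : Int))] [((2 : Int), (1 : Int))] (le_refl _) Hf0 Hv0 Hhit0 hμ
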